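-- pv_equiv track=rewrite | github.com/JAAFAR1996/ai-teddy-bear- | src/application/services/ai/analysis_orchestrator_service.py | _categorize_words
-- ===== SOURCE A (Python) =====
-- from typing import Any, Dict, List
--
-- def _categorize_words(words: set) -> Dict[str, int]:
--     """Categorize words by type (mock implementation)"""
--     categories = {"nouns": 0, "verbs": 0, "adjectives": 0, "advanced": 0}
--
--     # Mock categorization
--     for word in words:
--         if len(word) > 6:
--             categories["advanced"] += 1
--         elif word.endswith("ing"):
--             categories["verbs"] += 1
--         else:
--             categories["nouns"] += 1
--
--     return categories
-- ===== SOURCE B (Python) =====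
-- def _categorize_words(words: set) -> dict:
--     """Categorize words by type (mock implementation)"""
--     advanced = sum(1 for w in words if len(w) > 6)
--     verbs = sum(1 for w in words if len(w) <= 6 and w.endswith("ing"))
--     nouns = len(words) - advanced - verbs
--     return {"nouns": nouns, "verbs": verbs, "adjectives": 0, "advanced": advanced}
-- ===== Notes on version B (the rewrite author's own statement) =====
-- stated objective: alternative
-- what changed: Replaces the single if/elif/else loop mutating a counter dict with independent filtered counts (generator sums) for advanced and verbs, deriving nouns by complement from len(words); the dict is built once at the end.
import Mathlib
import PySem

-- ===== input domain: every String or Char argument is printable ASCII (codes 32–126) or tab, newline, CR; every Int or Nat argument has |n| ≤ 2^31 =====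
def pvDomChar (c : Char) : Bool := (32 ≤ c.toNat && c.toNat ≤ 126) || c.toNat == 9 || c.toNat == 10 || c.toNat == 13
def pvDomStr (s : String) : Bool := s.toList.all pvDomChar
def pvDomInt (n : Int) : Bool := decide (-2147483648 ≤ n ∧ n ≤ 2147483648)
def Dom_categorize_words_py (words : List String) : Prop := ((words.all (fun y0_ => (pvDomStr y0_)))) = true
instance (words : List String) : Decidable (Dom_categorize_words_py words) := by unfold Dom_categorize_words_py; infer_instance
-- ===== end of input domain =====

-- B replaces the one-pass if/elif/else counting loop with independent filtered counts and nouns by complement (alternative decomposition, same cost).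
-- ===== PORT A =====
def categorize_words_py (words : List String) : List (String × Int) :=
  (words.foldl
    (fun categories word =>
      if 6 < PySem.Str.len word then categories.modify "advanced" 0 (· + 1)
      else if PySem.Str.endswith word "ing" then categories.modify "verbs" 0 (· + 1)
      else categories.modify "nouns" 0 (· + 1))
    (PySem.Dict.ofList [("nouns", (0 : Int)), ("verbs", 0), ("adjectives", 0), ("advanced", 0)])).items

-- ===== PORT B =====
def categorize_words_py_alt (words : List String) : List (String × Int) :=
  let advanced : Int := words.countP (fun w => decide (6 < PySem.Str.len w))
  let verbs : Int := words.countP (fun w => decide (PySem.Str.len w ≤ 6) && PySem.Str.endswith w "ing")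
  let nouns : Int := (words.length : Int) - advanced - verbs
  [("nouns", nouns), ("verbs", verbs), ("adjectives", 0), ("advanced", advanced)]

-- ===== PRECONDITION & SPEC =====
def Spec_categorize_words_py (words : List String) (out : List (String × Int)) : Prop := out = categorize_words_py_alt words
instance (words : List String) (out : List (String × Int)) : Decidable (Spec_categorize_words_py words out) := by unfold Spec_categorize_words_py; infer_instance

-- ===== CLAIM (what is proved, stated in full; the proofs are below) =====
def Claim_equal_categorize_words_py : Prop := ∀ (words : List String), Dom_categorize_words_py words → Spec_categorize_words_py words (categorize_words_py words)

-- ===== LEMMAS AND PROOFS =====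

-- one modify step of A's loop on the four-key dict, per branch
theorem mod_adv (n v a : Int) :
    (PySem.Dict.mk [("nouns", n), ("verbs", v), ("adjectives", (0 : Int)), ("advanced", a)]).modify "advanced" 0 (· + 1)
    = PySem.Dict.mk [("nouns", n), ("verbs", v), ("adjectives", 0), ("advanced", a + 1)] := by
  apply PySem.Dict.ext
  simp [PySem.Dict.modify, PySem.Dict.contains, PySem.Dict.get?, PySem.Dict.getD,
    PySem.Dict.insert, add_comm]

theorem mod_verbs (n v a : Int) :
    (PySem.Dict.mk [("nouns", n), ("verbs", v), ("adjectives", (0 : Int)), ("advanced", a)]).modify "verbs" 0 (· + 1)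
    = PySem.Dict.mk [("nouns", n), ("verbs", v + 1), ("adjectives", 0), ("advanced", a)] := by
  apply PySem.Dict.ext
  simp [PySem.Dict.modify, PySem.Dict.contains, PySem.Dict.get?, PySem.Dict.getD,
    PySem.Dict.insert, add_comm]

theorem mod_nouns (n v a : Int) :
    (PySem.Dict.mk [("nouns", n), ("verbs", v), ("adjectives", (0 : Int)), ("advanced", a)]).modify "nouns" 0 (· + 1)
    = PySem.Dict.mk [("nouns", n + 1), ("verbs", v), ("adjectives", 0), ("advanced", a)] := by
  apply PySem.Dict.ext
  simp [PySem.Dict.modify, PySem.Dict.contains, PySem.Dict.get?, PySem.Dict.getD,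
    PySem.Dict.insert, add_comm]

-- invariant for A's loop: the dict keeps its four keys, counts accumulate
theorem loopA_items (ws : List String) (n v a : Int) :
    (ws.foldl
      (fun categories word =>
        if 6 < PySem.Str.len word then categories.modify "advanced" 0 (· + 1)
        else if PySem.Str.endswith word "ing" then categories.modify "verbs" 0 (· + 1)
        else categories.modify "nouns" 0 (· + 1))
      (PySem.Dict.mk [("nouns", n), ("verbs", v), ("adjectives", 0), ("advanced", a)])).items
    = [("nouns", n + ws.countP (fun w => !decide (6 < PySem.Str.len w) && !PySem.Str.endswith w "ing")),
       ("verbs", v + ws.countP (fun w => !decide (6 < PySem.Str.len w) && PySem.Str.endswith w "ing")),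
       ("adjectives", 0),
       ("advanced", a + ws.countP (fun w => decide (6 < PySem.Str.len w)))] := by
  induction ws generalizing n v a with
  | nil => simp
  | cons h t ih =>
    rw [List.foldl_cons]
    by_cases hl : 6 < PySem.Str.len h
    · have hb1 : decide (6 < PySem.Str.len h) = true := decide_eq_true hl
      have c1 : (h :: t).countP (fun w => decide (6 < PySem.Str.len w))
          = t.countP (fun w => decide (6 < PySem.Str.len w)) + 1 := by
        simp only [List.countP_cons, hb1, if_true]
      have c2 : (h :: t).countP (fun w => !decide (6 < PySem.Str.len w) && !PySem.Str.endswith w "ing")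
          = t.countP (fun w => !decide (6 < PySem.Str.len w) && !PySem.Str.endswith w "ing") := by
        simp only [List.countP_cons, hb1, Bool.not_true, Bool.false_and]
        simp
      have c3 : (h :: t).countP (fun w => !decide (6 < PySem.Str.len w) && PySem.Str.endswith w "ing")
          = t.countP (fun w => !decide (6 < PySem.Str.len w) && PySem.Str.endswith w "ing") := by
        simp only [List.countP_cons, hb1, Bool.not_true, Bool.false_and]
        simp
      rw [if_pos hl, mod_adv, ih, c1, c2, c3]
      push_cast
      simp [add_assoc, add_comm, add_left_comm]
    · have hb1 : decide (6 < PySem.Str.len h) = false := decide_eq_false hl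
      by_cases he : PySem.Str.endswith h "ing" = true
      · have c1 : (h :: t).countP (fun w => decide (6 < PySem.Str.len w))
            = t.countP (fun w => decide (6 < PySem.Str.len w)) := by
          simp only [List.countP_cons, hb1]
          simp
        have c2 : (h :: t).countP (fun w => !decide (6 < PySem.Str.len w) && !PySem.Str.endswith w "ing")
            = t.countP (fun w => !decide (6 < PySem.Str.len w) && !PySem.Str.endswith w "ing") := by
          simp only [List.countP_cons, hb1, he, Bool.not_true, Bool.not_false, Bool.true_and, Bool.and_false]
          simp
        have c3 : (h :: t).countP (fun w => !decide (6 < PySem.Str.len w) && PySem.Str.endswith w "ing")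
            = t.countP (fun w => !decide (6 < PySem.Str.len w) && PySem.Str.endswith w "ing") + 1 := by
          simp only [List.countP_cons, hb1, he, Bool.not_false, Bool.true_and, if_true]
        rw [if_neg hl, if_pos he, mod_verbs, ih, c1, c2, c3]
        push_cast
        simp [add_assoc, add_comm, add_left_comm]
      · have he' : PySem.Str.endswith h "ing" = false := by
          cases hx : PySem.Str.endswith h "ing" with
          | false => rfl
          | true => exact absurd hx he
        have c1 : (h :: t).countP (fun w => decide (6 < PySem.Str.len w))
            = t.countP (fun w => decide (6 < PySem.Str.len w)) := by
          simp only [List.countP_cons, hb1]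
          simp
        have c2 : (h :: t).countP (fun w => !decide (6 < PySem.Str.len w) && !PySem.Str.endswith w "ing")
            = t.countP (fun w => !decide (6 < PySem.Str.len w) && !PySem.Str.endswith w "ing") + 1 := by
          simp only [List.countP_cons, hb1, he', Bool.not_false, Bool.true_and, if_true]
        have c3 : (h :: t).countP (fun w => !decide (6 < PySem.Str.len w) && PySem.Str.endswith w "ing")
            = t.countP (fun w => !decide (6 < PySem.Str.len w) && PySem.Str.endswith w "ing") := by
          simp only [List.countP_cons, hb1, he', Bool.not_false, Bool.true_and, Bool.and_false]
          simp
        rw [if_neg hl, if_neg he, mod_nouns, ih, c1, c2, c3]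
        push_cast
        simp [add_assoc, add_comm, add_left_comm]

-- the three branch predicates partition the list
theorem counts_partition (ws : List String) :
    ws.countP (fun w => !decide (6 < PySem.Str.len w) && !PySem.Str.endswith w "ing")
    + ws.countP (fun w => !decide (6 < PySem.Str.len w) && PySem.Str.endswith w "ing")
    + ws.countP (fun w => decide (6 < PySem.Str.len w)) = ws.length := by
  induction ws with
  | nil => simp
  | cons h t ih =>
    rw [List.countP_cons, List.countP_cons, List.countP_cons, List.length_cons]
    cases hb1 : decide (6 < PySem.Str.len h) <;> cases hb2 : PySem.Str.endswith h "ing" <;>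
      simp only [hb1, hb2, Bool.not_true, Bool.not_false, Bool.true_and, Bool.false_and,
        Bool.and_true, Bool.and_false, Bool.and_self, Bool.false_eq_true, Bool.true_eq_false,
        if_true, if_false] <;> omega

-- B's verbs test (len <= 6) equals A's (not len > 6)
theorem verbs_pred_eq (ws : List String) :
    ws.countP (fun w => decide (PySem.Str.len w ≤ 6) && PySem.Str.endswith w "ing")
    = ws.countP (fun w => !decide (6 < PySem.Str.len w) && PySem.Str.endswith w "ing") := by
  apply List.countP_congr
  intro w _
  by_cases hl : 6 < PySem.Str.len w
  · rw [decide_eq_true hl, decide_eq_false (not_le.mpr hl)]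
    rfl
  · rw [decide_eq_false hl, decide_eq_true (not_lt.mp hl)]
    rfl

-- ===== VERDICT (by name: the statement is the Claim_ definition above) =====
theorem categorize_words_py_spec : Claim_equal_categorize_words_py := by
  intro words _
  unfold Spec_categorize_words_py
  have hinit : PySem.Dict.ofList [("nouns", (0 : Int)), ("verbs", 0), ("adjectives", 0), ("advanced", 0)]
      = PySem.Dict.mk [("nouns", 0), ("verbs", 0), ("adjectives", 0), ("advanced", 0)] := by
    decide
  have hA : categorize_words_py words
      = [("nouns", (words.countP (fun w => !decide (6 < PySem.Str.len w) && !PySem.Str.endswith w "ing") : Int)),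
         ("verbs", (words.countP (fun w => !decide (6 < PySem.Str.len w) && PySem.Str.endswith w "ing") : Int)),
         ("adjectives", 0),
         ("advanced", (words.countP (fun w => decide (6 < PySem.Str.len w)) : Int))] := by
    unfold categorize_words_py
    rw [hinit, loopA_items]
    simp
  have hp := counts_partition words
  have hn : (words.countP (fun w => !decide (6 < PySem.Str.len w) && !PySem.Str.endswith w "ing") : Int)
      = (words.length : Int)
        - (words.countP (fun w => decide (6 < PySem.Str.len w)) : Int)
        - (words.countP (fun w => !decide (6 < PySem.Str.len w) && PySem.Str.endswith w "ing") : Int) := by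
    omega
  simp only [categorize_words_py_alt]
  rw [hA, verbs_pred_eq, hn]
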